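-- pv_equiv track=rewrite | github.com/adityabelgaonkar05/CompProgLog | pythontestong.py | compute_fg
-- ===== SOURCE A (Python) =====
-- def compute_fg(permutation, m, k):
--     n = len(permutation)
--     f = [0] * n
--     g = [0] * n
--     f_sum = 0
--     g_sum = 0
--
--     for i in range(n):
--         if permutation[i] >= k:
--             f_sum += permutation[i]
--         f[i] = f_sum
--
--         if permutation[i] <= m:
--             g_sum += permutation[i]
--         g[i] = g_sum
--
--     return f, g
-- ===== SOURCE B (Python) =====
-- def _prefix_sums(xs):
--     out = []
--     total = 0
--     for x in xs:
--         total += x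
--         out.append(total)
--     return out
--
--
-- def compute_fg(permutation, m, k):
--     fvals = [x if x >= k else 0 for x in permutation]
--     gvals = [x if x <= m else 0 for x in permutation]
--     return _prefix_sums(fvals), _prefix_sums(gvals)
-- ===== Notes on version B (the rewrite author's own statement) =====
-- stated objective: idiomatic
-- what changed: B separates the per-element masking (two comprehensions building the masked contribution lists) from the cumulative scan (a shared prefix-sum helper applied to each), instead of A's single fused index loop carrying four pieces of running state.
import Mathlib
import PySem

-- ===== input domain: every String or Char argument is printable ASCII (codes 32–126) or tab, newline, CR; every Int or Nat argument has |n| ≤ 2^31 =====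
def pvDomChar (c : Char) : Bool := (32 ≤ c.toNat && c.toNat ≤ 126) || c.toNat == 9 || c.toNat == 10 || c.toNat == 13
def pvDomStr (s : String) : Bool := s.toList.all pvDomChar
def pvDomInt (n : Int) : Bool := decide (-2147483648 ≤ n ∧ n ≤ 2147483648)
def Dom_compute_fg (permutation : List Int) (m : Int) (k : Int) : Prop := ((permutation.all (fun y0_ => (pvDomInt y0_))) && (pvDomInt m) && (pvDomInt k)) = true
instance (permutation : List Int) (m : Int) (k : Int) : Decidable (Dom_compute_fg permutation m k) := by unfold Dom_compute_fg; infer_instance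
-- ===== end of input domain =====

-- B separates per-element masking (two masked contribution lists) from the cumulative scan
-- (a shared prefix-sum helper) instead of A's single fused loop with four running variables.

-- ===== PORT A =====
-- A: one loop; f_sum accumulates elements ≥ k, g_sum elements ≤ m; f[i]/g[i] record the running sums.
def compute_fg (permutation : List Int) (m : Int) (k : Int) : List Int × List Int :=
  let st := permutation.foldl
    (fun (st : List Int × List Int × Int × Int) x =>
      let f_sum := if x ≥ k then st.2.2.1 + x else st.2.2.1
      let g_sum := if x ≤ m then st.2.2.2 + x else st.2.2.2
      (st.1 ++ [f_sum], st.2.1 ++ [g_sum], f_sum, g_sum))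
    ([], [], 0, 0)
  (st.1, st.2.1)

-- ===== PORT B =====
-- _prefix_sums: running-total loop appending each partial sum.
def prefixSums (xs : List Int) : List Int :=
  (xs.foldl (fun (st : List Int × Int) x => (st.1 ++ [st.2 + x], st.2 + x)) ([], 0)).1

def compute_fg_alt (permutation : List Int) (m : Int) (k : Int) : List Int × List Int :=
  let fc := permutation.map (fun x => if x ≥ k then x else 0)
  let gc := permutation.map (fun x => if x ≤ m then x else 0)
  (prefixSums fc, prefixSums gc)

-- ===== PRECONDITION & SPEC =====
def Spec_compute_fg (permutation : List Int) (m : Int) (k : Int) (out : List Int × List Int) : Prop := out = compute_fg_alt permutation m k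
instance (permutation : List Int) (m : Int) (k : Int) (out : List Int × List Int) : Decidable (Spec_compute_fg permutation m k out) := by unfold Spec_compute_fg; infer_instance

-- ===== CLAIM (what is proved, stated in full; the proofs are below) =====
def Claim_equal_compute_fg : Prop := ∀ (permutation : List Int) (m : Int) (k : Int), Dom_compute_fg permutation m k → Spec_compute_fg permutation m k (compute_fg permutation m k)

-- ===== LEMMAS AND PROOFS =====

-- A's fused fold, from an arbitrary state, equals the pair of B's masked prefix-sum folds
-- started from the corresponding (list, sum) states.
theorem compute_fg_fold_eq (m k : Int) : ∀ (p : List Int) (fa ga : List Int) (fs gs : Int),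
    p.foldl
      (fun (st : List Int × List Int × Int × Int) x =>
        let f_sum := if x ≥ k then st.2.2.1 + x else st.2.2.1
        let g_sum := if x ≤ m then st.2.2.2 + x else st.2.2.2
        (st.1 ++ [f_sum], st.2.1 ++ [g_sum], f_sum, g_sum))
      (fa, ga, fs, gs)
    = (((p.map (fun x => if x ≥ k then x else 0)).foldl
          (fun (st : List Int × Int) x => (st.1 ++ [st.2 + x], st.2 + x)) (fa, fs)).1,
       ((p.map (fun x => if x ≤ m then x else 0)).foldl
          (fun (st : List Int × Int) x => (st.1 ++ [st.2 + x], st.2 + x)) (ga, gs)).1,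
       ((p.map (fun x => if x ≥ k then x else 0)).foldl
          (fun (st : List Int × Int) x => (st.1 ++ [st.2 + x], st.2 + x)) (fa, fs)).2,
       ((p.map (fun x => if x ≤ m then x else 0)).foldl
          (fun (st : List Int × Int) x => (st.1 ++ [st.2 + x], st.2 + x)) (ga, gs)).2) := by
  intro p
  induction p with
  | nil => intro fa ga fs gs; simp
  | cons x xs ih =>
      intro fa ga fs gs
      simp only [List.map_cons, List.foldl_cons]
      rw [ih]
      by_cases hf : x ≥ k <;> by_cases hg : x ≤ m <;>
        simp [hf, hg]

-- ===== VERDICT (by name: the statement is the Claim_ definition above) =====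
theorem compute_fg_spec : Claim_equal_compute_fg := by
  intro p m k _
  unfold Spec_compute_fg compute_fg compute_fg_alt prefixSums
  simp only [compute_fg_fold_eq m k p [] [] 0 0]
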